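-- pv_equiv track=rewrite | github.com/lazaro92/AdventOfCode2020 | day10/part1.py | process_jolts
-- ===== SOURCE A (Python) =====
-- def process_jolts(jolts):
--     x = 0
--     diff1 = 0
--     diff3 = 0
--     for x in range(len(jolts)):
--         if x + 1 == len(jolts):
--             break
--
--         if jolts[x+1] - jolts[x] == 3:
--                 diff3 += 1
--         elif jolts[x+1] - jolts[x] == 2:
--                 continue
--         elif jolts[x+1] - jolts[x] == 1:
--                 diff1 += 1
--         else:
--             return -1
--     return diff1 * diff3
-- ===== SOURCE B (Python) =====
-- def process_jolts(jolts):
--     def counts(lo, hi):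
--         # (diff1, diff3) over adjacent pairs (i, i+1) for lo <= i < hi, or None on a bad gap
--         if hi - lo == 0:
--             return (0, 0)
--         if hi - lo == 1:
--             step = jolts[lo + 1] - jolts[lo]
--             if step == 1:
--                 return (1, 0)
--             if step == 2:
--                 return (0, 0)
--             if step == 3:
--                 return (0, 1)
--             return None
--         mid = (lo + hi) // 2
--         left = counts(lo, mid)
--         if left is None:
--             return None
--         right = counts(mid, hi)
--         if right is None:
--             return None
--         return (left[0] + right[0], left[1] + right[1])
--
--     res = counts(0, len(jolts) - 1) if len(jolts) >= 2 else (0, 0)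
--     return -1 if res is None else res[0] * res[1]
-- ===== Notes on version B (the rewrite author's own statement) =====
-- stated objective: alternative
-- what changed: B replaces A's left-to-right loop with two counters and early return by a divide-and-conquer recursion over index intervals that returns an optional (diff1, diff3) pair per half and combines halves by componentwise addition (None propagating a bad gap).
import Mathlib
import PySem

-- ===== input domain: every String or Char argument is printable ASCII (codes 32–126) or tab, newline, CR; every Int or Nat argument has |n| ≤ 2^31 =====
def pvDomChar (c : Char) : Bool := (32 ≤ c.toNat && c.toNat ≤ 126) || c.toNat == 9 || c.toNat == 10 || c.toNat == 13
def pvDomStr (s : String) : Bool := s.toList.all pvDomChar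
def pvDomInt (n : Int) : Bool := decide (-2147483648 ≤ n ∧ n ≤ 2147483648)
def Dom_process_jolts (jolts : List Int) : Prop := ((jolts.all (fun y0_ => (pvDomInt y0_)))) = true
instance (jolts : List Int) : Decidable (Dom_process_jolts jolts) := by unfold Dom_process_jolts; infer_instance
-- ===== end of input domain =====

-- B computes the (diff1, diff3) counts by divide and conquer over index intervals instead of A's left-to-right loop; alternative decomposition, same asymptotic cost.


-- ===== PORT A =====
-- A's loop reads jolts[x], jolts[x+1] and stops when x+1 == len(jolts); transliterated as
-- structural recursion on the consecutive pairs, threading the two accumulators, with early return -1.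
def pjLoopA : List Int → Int → Int → Int
  | a :: b :: rest, diff1, diff3 =>
    if b - a = 3 then pjLoopA (b :: rest) diff1 (diff3 + 1)
    else if b - a = 2 then pjLoopA (b :: rest) diff1 diff3
    else if b - a = 1 then pjLoopA (b :: rest) (diff1 + 1) diff3
    else -1
  | _, diff1, diff3 => diff1 * diff3

def process_jolts (jolts : List Int) : Int := pjLoopA jolts 0 0

-- ===== PORT B =====
-- the one-pair base case of B's counts(lo, hi)  (step = jolts[lo+1] - jolts[lo]; indices always in range at the call sites)
def pjStep (jolts : List Int) (lo : Nat) : Option (Int × Int) :=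
  let step := jolts.getD (lo + 1) 0 - jolts.getD lo 0
  if step = 1 then some (1, 0)
  else if step = 2 then some (0, 0)
  else if step = 3 then some (0, 1)
  else none

-- 'left is None → None; right is None → None; else componentwise sum' of B's combine step
def pjAdd : Option (Int × Int) → Option (Int × Int) → Option (Int × Int)
  | none, _ => none
  | some _, none => none
  | some l, some r => some (l.1 + r.1, l.2 + r.2)

-- B's recursive counts(lo, hi): divide and conquer on the index interval.
-- The fuel argument (always ≥ hi - lo - 1 at the call sites) only makes the halving
-- recursion structural; the 'fuel = 0' branch is never reached.
def pjDC (jolts : List Int) (fuel lo hi : Nat) : Option (Int × Int) :=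
  if hi - lo = 0 then some (0, 0)
  else if hi - lo = 1 then pjStep jolts lo
  else match fuel with
    | 0 => none
    | f + 1 =>
      let mid := (lo + hi) / 2
      pjAdd (pjDC jolts f lo mid) (pjDC jolts f mid hi)

def process_jolts_alt (jolts : List Int) : Int :=
  let res := if jolts.length ≥ 2 then pjDC jolts (jolts.length - 1) 0 (jolts.length - 1)
             else some (0, 0)
  match res with
  | none => -1
  | some r => r.1 * r.2

-- ===== PRECONDITION & SPEC =====
def Spec_process_jolts (jolts : List Int) (out : Int) : Prop := out = process_jolts_alt jolts
instance (jolts : List Int) (out : Int) : Decidable (Spec_process_jolts jolts out) := by unfold Spec_process_jolts; infer_instance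

-- ===== CLAIM (what is proved, stated in full; the proofs are below) =====
def Claim_equal_process_jolts : Prop := ∀ (jolts : List Int), Dom_process_jolts jolts → Spec_process_jolts jolts (process_jolts jolts)

-- ===== LEMMAS AND PROOFS =====

-- left-to-right reference: the counts over n consecutive diffs starting at index lo
def pjLin (jolts : List Int) (lo : Nat) : Nat → Option (Int × Int)
  | 0 => some (0, 0)
  | n + 1 => pjAdd (pjStep jolts lo) (pjLin jolts (lo + 1) n)

theorem pjAdd_zero_left (x : Option (Int × Int)) : pjAdd (some (0, 0)) x = x := by
  cases x <;> simp [pjAdd]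

theorem pjAdd_zero_right (x : Option (Int × Int)) : pjAdd x (some (0, 0)) = x := by
  cases x <;> simp [pjAdd]

theorem pjAdd_assoc (x y z : Option (Int × Int)) :
    pjAdd (pjAdd x y) z = pjAdd x (pjAdd y z) := by
  cases x <;> cases y <;> cases z <;> simp [pjAdd] <;> constructor <;> ring

theorem pjLin_split (jolts : List Int) (m : Nat) : ∀ (lo n : Nat),
    pjLin jolts lo (m + n) = pjAdd (pjLin jolts lo m) (pjLin jolts (lo + m) n) := by
  induction m with
  | zero => intro lo n; simp [pjLin, pjAdd_zero_left]
  | succ m ih =>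
    intro lo n
    have : m + 1 + n = (m + n) + 1 := by omega
    rw [this]
    show pjAdd (pjStep jolts lo) (pjLin jolts (lo + 1) (m + n)) = _
    rw [ih (lo + 1) n]
    have : lo + 1 + m = lo + (m + 1) := by omega
    rw [this, ← pjAdd_assoc]
    rfl

theorem pjDC_eq_lin (jolts : List Int) : ∀ (fuel lo hi : Nat), hi - lo ≤ fuel + 1 →
    pjDC jolts fuel lo hi = pjLin jolts lo (hi - lo) := by
  intro fuel
  induction fuel with
  | zero =>
    intro lo hi h
    by_cases h0 : hi - lo = 0
    · rw [pjDC]; simp [h0, pjLin]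
    · have h1 : hi - lo = 1 := by omega
      rw [pjDC]; simp [h1, pjLin, pjAdd_zero_right]
  | succ f ih =>
    intro lo hi h
    by_cases h0 : hi - lo = 0
    · rw [pjDC]; simp [h0, pjLin]
    · by_cases h1 : hi - lo = 1
      · rw [pjDC]; simp [h1, pjLin, pjAdd_zero_right]
      · rw [pjDC]
        simp only [h0, h1, if_false]
        set mid := (lo + hi) / 2 with hmid
        have hm1 : mid - lo ≤ f + 1 := by omega
        have hm2 : hi - mid ≤ f + 1 := by omega
        rw [ih lo mid hm1, ih mid hi hm2]
        have hsum : (mid - lo) + (hi - mid) = hi - lo := by omega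
        have hmid' : lo + (mid - lo) = mid := by omega
        rw [← hsum, pjLin_split, hmid']

-- list-structural reference and its relation to A's loop
def pjL : List Int → Option (Int × Int)
  | a :: b :: rest => pjAdd (pjStep (a :: b :: rest) 0) (pjL (b :: rest))
  | _ => some (0, 0)

theorem pjStep_cons (a : Int) (t : List Int) (lo : Nat) :
    pjStep (a :: t) (lo + 1) = pjStep t lo := by
  simp [pjStep]

theorem pjLin_cons (jolts : List Int) (a : Int) (n : Nat) : ∀ (lo : Nat),
    pjLin (a :: jolts) (lo + 1) n = pjLin jolts lo n := by
  induction n with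
  | zero => intro lo; rfl
  | succ n ih =>
    intro lo
    show pjAdd (pjStep (a :: jolts) (lo + 1)) (pjLin (a :: jolts) (lo + 1 + 1) n) = _
    rw [pjStep_cons, ih (lo + 1)]
    rfl

theorem pjLin_eq_pjL : ∀ (l : List Int), pjLin l 0 (l.length - 1) = pjL l := by
  intro l
  induction l with
  | nil => rfl
  | cons a t ih =>
    cases t with
    | nil => rfl
    | cons b rest =>
      show pjLin (a :: b :: rest) 0 ((b :: rest).length - 1 + 1) = _
      rw [pjL]
      show pjAdd (pjStep (a :: b :: rest) 0) (pjLin (a :: b :: rest) 1 ((b :: rest).length - 1)) = _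
      rw [show (1 : Nat) = 0 + 1 from rfl, pjLin_cons, ih]

-- proof-only view of an Option result as A's final value
def pjOut (o : Option (Int × Int)) (d1 d3 : Int) : Int :=
  match o with
  | none => -1
  | some r => (d1 + r.1) * (d3 + r.2)

theorem pjOut_some (r : Int × Int) (d1 d3 : Int) :
    pjOut (some r) d1 d3 = (d1 + r.1) * (d3 + r.2) := rfl

theorem pjAdd_some_some (l r : Int × Int) :
    pjAdd (some l) (some r) = some (l.1 + r.1, l.2 + r.2) := rfl
theorem pjLoopA_eq (l : List Int) : ∀ (d1 d3 : Int),
    pjLoopA l d1 d3 = pjOut (pjL l) d1 d3 := by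
  induction l with
  | nil => intro d1 d3; simp [pjLoopA, pjL, pjOut]
  | cons a t ih =>
    cases t with
    | nil => intro d1 d3; simp [pjLoopA, pjL, pjOut]
    | cons b rest =>
      intro d1 d3
      rw [pjL]
      have hstep : pjStep (a :: b :: rest) 0 =
          (if b - a = 1 then some ((1 : Int), (0 : Int))
           else if b - a = 2 then some (0, 0)
           else if b - a = 3 then some (0, 1) else none) := by
        simp [pjStep]
      by_cases h3 : b - a = 3
      · have h1 : ¬ b - a = 1 := by omega
        have h2 : ¬ b - a = 2 := by omega
        have hs : pjStep (a :: b :: rest) 0 = some (0, 1) := by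
          rw [hstep]; simp [h3]
        rw [show pjLoopA (a :: b :: rest) d1 d3 = pjLoopA (b :: rest) d1 (d3 + 1) by
              simp [pjLoopA, h3], ih]
        rw [hs]
        cases hc : pjL (b :: rest) with
        | none => rfl
        | some r => rw [pjAdd_some_some, pjOut_some, pjOut_some]; ring
      · by_cases h2 : b - a = 2
        · have h1 : ¬ b - a = 1 := by omega
          have hs : pjStep (a :: b :: rest) 0 = some (0, 0) := by
            rw [hstep]; simp [h2]
          rw [show pjLoopA (a :: b :: rest) d1 d3 = pjLoopA (b :: rest) d1 d3 by
                simp [pjLoopA, h2], ih]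
          rw [hs]
          cases hc : pjL (b :: rest) with
          | none => rfl
          | some r => rw [pjAdd_some_some, pjOut_some, pjOut_some]; ring
        · by_cases h1 : b - a = 1
          · have hs : pjStep (a :: b :: rest) 0 = some (1, 0) := by
              rw [hstep]; simp [h1]
            rw [show pjLoopA (a :: b :: rest) d1 d3 = pjLoopA (b :: rest) (d1 + 1) d3 by
                  simp [pjLoopA, h1], ih]
            rw [hs]
            cases hc : pjL (b :: rest) with
            | none => rfl
            | some r => rw [pjAdd_some_some, pjOut_some, pjOut_some]; ring
          · have hs : pjStep (a :: b :: rest) 0 = none := by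
              rw [hstep]; simp [h1, h2, h3]
            rw [show pjLoopA (a :: b :: rest) d1 d3 = -1 by simp [pjLoopA, h1, h2, h3]]
            rw [hs]
            rfl

-- ===== VERDICT (by name: the statement is the Claim_ definition above) =====
theorem process_jolts_spec : Claim_equal_process_jolts := by
  intro jolts _
  unfold Spec_process_jolts process_jolts process_jolts_alt
  rw [pjLoopA_eq]
  by_cases hlen : jolts.length ≥ 2
  · rw [if_pos hlen, pjDC_eq_lin jolts (jolts.length - 1) 0 (jolts.length - 1) (by omega),
      Nat.sub_zero, pjLin_eq_pjL]
    cases hc : pjL jolts with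
    | none => rfl
    | some r => show (0 + r.1) * (0 + r.2) = r.1 * r.2; ring
  · match jolts, hlen with
    | [], _ => rfl
    | [a], _ => rfl
    | a :: b :: rest, h => exact absurd (by simp) h
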